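-- pv_equiv track=rewrite | github.com/vtn-hz/teoinf-tps | utils/errores/multiparidad/errors.py | trackErrorMultiparidad
-- ===== SOURCE A (Python) =====
-- def trackErrorMultiparidad( matrix: list, par = True ) -> list:
--     errHorizontal = []
--     errVertical = []
--
--     detectCruzada = sum( matrix[0] ) % 2
--     paridadGap = 0 if par else 1
--
--     # Verificar paridad horizontal
--     for i in range( len(matrix) ):
--         bitAmount = 0
--         for j in range( len(matrix[i]) ):
--             bitAmount += matrix[i][j]
--
--         if i == len(matrix) and  ((bitAmount + detectCruzada) % 2 == 0):
--             errHorizontal.append(i)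
--         elif ((bitAmount + paridadGap) % 2) != 0:
--             errHorizontal.append(i)
--
--     # Verificar paridad vertical
--     for j in range(len(matrix[0])):
--         bitAmount = 0
--         for i in range(len(matrix)):
--             bitAmount += matrix[i][j]
--
--         if j == len(matrix[0]) and  ((bitAmount + detectCruzada) % 2 == 0):
--             errVertical.append(j)
--         elif ((bitAmount + paridadGap) % 2) != 0:
--             errVertical.append(j)
--
--     return errHorizontal, errVertical
-- ===== SOURCE B (Python) =====
-- def trackErrorMultiparidad(matrix: list, par=True) -> list:
--     width = len(matrix[0])
--     gap = 0 if par else 1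
--     errHorizontal = []
--     colSums = [0] * width
--     for i, row in enumerate(matrix):
--         if (sum(row) + gap) % 2 != 0:
--             errHorizontal.append(i)
--         for j in range(width):
--             colSums[j] += row[j]
--     errVertical = [j for j, s in enumerate(colSums) if (s + gap) % 2 != 0]
--     return errHorizontal, errVertical
-- ===== Notes on version B (the rewrite author's own statement) =====
-- stated objective: alternative
-- what changed: A makes two separate passes, recomputing each column sum column-major with a nested index loop; B makes one row-wise pass that classifies each row and accumulates all column sums simultaneously, then classifies the accumulated sums in a short comprehension.
import Mathlib
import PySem

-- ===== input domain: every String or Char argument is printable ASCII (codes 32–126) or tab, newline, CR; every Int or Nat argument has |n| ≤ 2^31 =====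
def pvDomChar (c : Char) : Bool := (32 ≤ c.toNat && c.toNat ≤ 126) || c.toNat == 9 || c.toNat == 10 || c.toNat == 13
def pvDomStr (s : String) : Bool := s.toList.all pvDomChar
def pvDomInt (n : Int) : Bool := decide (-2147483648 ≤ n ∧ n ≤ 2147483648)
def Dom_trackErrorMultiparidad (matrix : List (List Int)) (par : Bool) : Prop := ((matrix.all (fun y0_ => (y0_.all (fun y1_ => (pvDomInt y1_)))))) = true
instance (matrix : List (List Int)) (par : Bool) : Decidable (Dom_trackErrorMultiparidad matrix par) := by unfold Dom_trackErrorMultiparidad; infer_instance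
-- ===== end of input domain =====

-- B replaces A's two column-major passes by one row-wise pass accumulating all column sums (alternative decomposition, same cost).

-- ===== PORT A =====
def trackErrorMultiparidad (matrix : List (List Int)) (par : Bool) : List Int × List Int :=
  let detectCruzada := PySem.Int.mod ((PySem.List.pyGetD matrix 0 []).foldl (· + ·) 0) 2
  let paridadGap : Int := if par then 0 else 1
  let errHorizontal := (PySem.List.pyRange 0 (PySem.List.len matrix) 1).foldl (fun acc i =>
    let row := PySem.List.pyGetD matrix i []
    let bitAmount := (PySem.List.pyRange 0 (PySem.List.len row) 1).foldl
      (fun s j => s + PySem.List.pyGetD row j 0) 0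
    if i = PySem.List.len matrix ∧ PySem.Int.mod (bitAmount + detectCruzada) 2 = 0 then acc ++ [i]
    else if PySem.Int.mod (bitAmount + paridadGap) 2 ≠ 0 then acc ++ [i]
    else acc) []
  let errVertical := (PySem.List.pyRange 0 (PySem.List.len (PySem.List.pyGetD matrix 0 [])) 1).foldl (fun acc j =>
    let bitAmount := (PySem.List.pyRange 0 (PySem.List.len matrix) 1).foldl
      (fun s i => s + PySem.List.pyGetD (PySem.List.pyGetD matrix i []) j 0) 0
    if j = PySem.List.len (PySem.List.pyGetD matrix 0 []) ∧ PySem.Int.mod (bitAmount + detectCruzada) 2 = 0 then acc ++ [j]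
    else if PySem.Int.mod (bitAmount + paridadGap) 2 ≠ 0 then acc ++ [j]
    else acc) []
  (errHorizontal, errVertical)

-- ===== PORT B =====
def trackErrorMultiparidad_alt (matrix : List (List Int)) (par : Bool) : List Int × List Int :=
  let width := (PySem.List.pyGetD matrix 0 []).length
  let gap : Int := if par then 0 else 1
  let st := (PySem.List.enumerate matrix 0).foldl
    (fun (st : List Int × List Int) p =>
      ((if PySem.Int.mod (p.2.foldl (· + ·) 0 + gap) 2 ≠ 0 then st.1 ++ [p.1] else st.1),
       (List.range width).map (fun j => st.2.getD j 0 + PySem.List.pyGetD p.2 (j : Int) 0)))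
    ([], List.replicate width 0)
  let errVertical := (PySem.List.enumerate st.2 0).foldl
    (fun acc q => if PySem.Int.mod (q.2 + gap) 2 ≠ 0 then acc ++ [q.1] else acc) []
  (st.1, errVertical)

-- ===== PRECONDITION & SPEC =====
-- Pre_ excludes exactly the inputs where the Python A raises IndexError (B raises there too):
-- the empty matrix (matrix[0]) and ragged matrices with a row shorter than the first row.
def Pre_trackErrorMultiparidad (matrix : List (List Int)) (par : Bool) : Prop :=
  matrix ≠ [] ∧ ∀ row ∈ matrix, (matrix.headD []).length ≤ row.length
instance (matrix : List (List Int)) (par : Bool) : Decidable (Pre_trackErrorMultiparidad matrix par) := by unfold Pre_trackErrorMultiparidad; infer_instance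
def pvWitness_trackErrorMultiparidad : List (List Int) × Bool := ([[1, 0], [0, 1]], true)

def Spec_trackErrorMultiparidad (matrix : List (List Int)) (par : Bool) (out : List Int × List Int) : Prop := out = trackErrorMultiparidad_alt matrix par
instance (matrix : List (List Int)) (par : Bool) (out : List Int × List Int) : Decidable (Spec_trackErrorMultiparidad matrix par out) := by unfold Spec_trackErrorMultiparidad; infer_instance

-- ===== CLAIM (what is proved, stated in full; the proofs are below) =====
def Claim_equal_trackErrorMultiparidad : Prop := ∀ (matrix : List (List Int)) (par : Bool), Dom_trackErrorMultiparidad matrix par → Pre_trackErrorMultiparidad matrix par → Spec_trackErrorMultiparidad matrix par (trackErrorMultiparidad matrix par)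

-- ===== LEMMAS AND PROOFS =====


-- helper: sum of column j over the rows (0 where a row is too short)
def pvColsum (rows : List (List Int)) (j : Int) : Int :=
  (rows.map (fun r => PySem.List.pyGetD r j 0)).sum

theorem pvMapRangeGetD (cols : List Int) (w : Nat) (h : cols.length = w) :
    (List.range w).map (fun j => cols.getD j 0) = cols := by
  apply List.ext_getElem
  · simp [h]
  · intro k h1 h2
    simp at h1
    simp [List.getD_eq_getElem?_getD, List.getElem?_eq_getElem h2]

theorem pvColsLoop (width : Nat) (rows : List (List Int)) :
    ∀ (cols : List Int), cols.length = width →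
    rows.foldl (fun cols row =>
        (List.range width).map (fun j => cols.getD j 0 + PySem.List.pyGetD row (j : Int) 0)) cols
      = (List.range width).map (fun j => cols.getD j 0 + pvColsum rows (j : Int)) := by
  induction rows with
  | nil =>
    intro cols h
    simp only [List.foldl_nil, pvColsum, List.map_nil, List.sum_nil, add_zero]
    exact (pvMapRangeGetD cols width h).symm
  | cons row rows ih =>
    intro cols h
    simp only [List.foldl_cons]
    rw [ih _ (by simp)]
    apply List.map_congr_left
    intro j hj
    simp at hj
    have : ((List.range width).map (fun j => cols.getD j 0 + PySem.List.pyGetD row (j : Int) 0)).getD j 0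
        = cols.getD j 0 + PySem.List.pyGetD row (j : Int) 0 := by
      simp [List.getD_eq_getElem?_getD, List.getElem?_map, List.getElem?_range hj]
    rw [this]
    simp [pvColsum]
    ring

-- A's horizontal loop: the dead crossed-parity branch removed, each row sum computed directly
theorem pvA_errH (matrix : List (List Int)) (gap dc : Int) :
    (PySem.List.pyRange 0 (PySem.List.len matrix) 1).foldl (fun acc i =>
      if i = PySem.List.len matrix ∧ PySem.Int.mod
          ((PySem.List.pyRange 0 (PySem.List.len (PySem.List.pyGetD matrix i [])) 1).foldl
            (fun s j => s + PySem.List.pyGetD (PySem.List.pyGetD matrix i []) j 0) 0 + dc) 2 = 0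
      then acc ++ [i]
      else if PySem.Int.mod
          ((PySem.List.pyRange 0 (PySem.List.len (PySem.List.pyGetD matrix i [])) 1).foldl
            (fun s j => s + PySem.List.pyGetD (PySem.List.pyGetD matrix i []) j 0) 0 + gap) 2 ≠ 0
      then acc ++ [i]
      else acc) []
    = (PySem.List.pyRange 0 (PySem.List.len matrix) 1).foldl (fun acc i =>
        if PySem.Int.mod ((PySem.List.pyGetD matrix i []).foldl (· + ·) 0 + gap) 2 ≠ 0
        then acc ++ [i] else acc) [] := by
  apply PySem.List.foldl_congr_mem
  intro acc i hi
  rw [PySem.List.mem_pyRange_one] at hi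
  simp only [PySem.List.len_eq] at hi ⊢
  simp only [PySem.List.foldl_pyRange_zero_pyGetD']
  have hne : ¬ (i = (matrix.length : Int) ∧
      PySem.Int.mod ((PySem.List.pyGetD matrix i []).foldl (fun s x => s + x) 0 + dc) 2 = 0) := by
    rintro ⟨h1, -⟩; omega
  rw [if_neg hne]

-- B's horizontal loop equals A's rewritten horizontal loop
theorem pvB_errH (matrix : List (List Int)) (gap : Int) :
    (PySem.List.enumerate matrix 0).foldl (fun acc p =>
      if PySem.Int.mod (p.2.foldl (· + ·) 0 + gap) 2 ≠ 0 then acc ++ [p.1] else acc) []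
    = (PySem.List.pyRange 0 (PySem.List.len matrix) 1).foldl (fun acc i =>
        if PySem.Int.mod ((PySem.List.pyGetD matrix i []).foldl (· + ·) 0 + gap) 2 ≠ 0
        then acc ++ [i] else acc) [] := by
  rw [PySem.List.enumerate_eq_map_pyRange (d := []), List.foldl_map]

-- B's column-sum accumulator ends up holding exactly the column sums
theorem pvB_cols (matrix : List (List Int)) (width : Nat) :
    (PySem.List.enumerate matrix 0).foldl (fun cols p =>
      (List.range width).map (fun j => cols.getD j 0 + PySem.List.pyGetD p.2 (j : Int) 0))
      (List.replicate width 0)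
    = (List.range width).map (fun j : Nat => pvColsum matrix (j : Int)) := by
  rw [PySem.List.enumerate_eq_map_pyRange (d := []), List.foldl_map]
  rw [PySem.List.foldl_pyRange_zero_pyGetD matrix []
      (fun cols row => (List.range width).map (fun j => cols.getD j 0 + PySem.List.pyGetD row (j : Int) 0))
      (List.replicate width 0)]
  rw [pvColsLoop width matrix _ (by simp)]
  apply List.map_congr_left
  intro j hj
  simp only [List.mem_range] at hj
  simp [List.getD_eq_getElem?_getD, hj]

-- A's vertical loop: dead branch removed, each column sum named
theorem pvA_errV (matrix : List (List Int)) (b gap dc : Int) :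
    (PySem.List.pyRange 0 b 1).foldl (fun acc j =>
      if j = b ∧ PySem.Int.mod
          ((PySem.List.pyRange 0 (PySem.List.len matrix) 1).foldl
            (fun s i => s + PySem.List.pyGetD (PySem.List.pyGetD matrix i []) j 0) 0 + dc) 2 = 0
      then acc ++ [j]
      else if PySem.Int.mod
          ((PySem.List.pyRange 0 (PySem.List.len matrix) 1).foldl
            (fun s i => s + PySem.List.pyGetD (PySem.List.pyGetD matrix i []) j 0) 0 + gap) 2 ≠ 0
      then acc ++ [j]
      else acc) []
    = (PySem.List.pyRange 0 b 1).foldl (fun acc j =>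
        if PySem.Int.mod (pvColsum matrix j + gap) 2 ≠ 0 then acc ++ [j] else acc) [] := by
  apply PySem.List.foldl_congr_mem
  intro acc j hj
  rw [PySem.List.mem_pyRange_one] at hj

  rw [PySem.List.foldl_pyRange_zero_pyGetD matrix []
      (fun s row => s + PySem.List.pyGetD row j 0) 0]
  have hsum : List.foldl (fun s row => s + PySem.List.pyGetD row j 0) 0 matrix
      = pvColsum matrix j := by
    rw [PySem.List.foldl_add (g := fun (row : List Int) => PySem.List.pyGetD row j 0)]
    simp [pvColsum]
  simp only [hsum]
  have hne : ¬ (j = b ∧ PySem.Int.mod (pvColsum matrix j + dc) 2 = 0) := by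
    rintro ⟨h1, -⟩; omega
  rw [if_neg hne]

-- B's vertical comprehension over the accumulated sums equals A's rewritten vertical loop
theorem pvB_errV (matrix : List (List Int)) (w : Nat) (gap : Int) :
    (PySem.List.enumerate ((List.range w).map (fun j : Nat => pvColsum matrix (j : Int))) 0).foldl
      (fun acc q => if PySem.Int.mod (q.2 + gap) 2 ≠ 0 then acc ++ [q.1] else acc) []
    = (PySem.List.pyRange 0 (w : Int) 1).foldl (fun acc j =>
        if PySem.Int.mod (pvColsum matrix j + gap) 2 ≠ 0 then acc ++ [j] else acc) [] := by
  have hcf : (List.range w).map (fun j : Nat => pvColsum matrix (j : Int))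
      = (PySem.List.pyRange 0 (w : Int) 1).map (fun j => pvColsum matrix j) := by
    rw [PySem.List.pyRange_one]
    simp [List.map_map]
  rw [hcf, PySem.List.enumerate_eq_map_pyRange (d := 0), List.foldl_map]
  have hlen : PySem.List.len ((PySem.List.pyRange 0 (w : Int) 1).map (fun j => pvColsum matrix j))
      = (w : Int) := by
    simp [PySem.List.len_eq, PySem.List.length_pyRange_one]
  rw [hlen]
  apply PySem.List.foldl_congr_mem
  intro acc j hj
  rw [PySem.List.mem_pyRange_one] at hj
  rw [PySem.List.pyGetD_map_pyRange_of_nonneg _ _ _ _ hj.1 hj.2]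

-- ===== VERDICT (by name: the statement is the Claim_ definition above) =====

theorem trackErrorMultiparidad_spec : Claim_equal_trackErrorMultiparidad := by
  intro matrix par _ _
  unfold Spec_trackErrorMultiparidad
  simp only [trackErrorMultiparidad, trackErrorMultiparidad_alt]
  rw [PySem.List.foldl_prod_mk
      (f := fun (acc : List Int) (p : Int × List Int) =>
        if PySem.Int.mod (p.2.foldl (· + ·) 0 + (if par then (0 : Int) else 1)) 2 ≠ 0
        then acc ++ [p.1] else acc)
      (g := fun (cols : List Int) (p : Int × List Int) =>
        (List.range (PySem.List.pyGetD matrix 0 []).length).map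
          (fun j => cols.getD j 0 + PySem.List.pyGetD p.2 (j : Int) 0))]
  rw [pvA_errH, pvA_errV, pvB_errH, pvB_cols, pvB_errV]
  simp [PySem.List.len_eq]
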